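-- pv_equiv track=rewrite | github.com/davesohamm/Nirma-ProgCode | sem-1/week-8/week-8-prob-6.py | check_all
-- ===== SOURCE A (Python) =====
-- def check_y(y, uncovered_pairs):
--     for a, b in uncovered_pairs:
--         if a != y and b != y:
--             return False
--     return True
--
-- def check_all(x, all_pairs):
--     uncovered = []
--     for a, b in all_pairs:
--         if a != x and b != x:
--             uncovered.append((a, b))
--
--     if not uncovered:
--         return True
--
--     y1 = uncovered[0][0]
--     if check_y(y1, uncovered):
--         return True
--
--     y2 = uncovered[0][1]
--     if check_y(y2, uncovered):
--         return True
--
--     return False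
-- ===== SOURCE B (Python) =====
-- def check_all(x, all_pairs):
--     uncovered = [(a, b) for (a, b) in all_pairs if a != x and b != x]
--     if not uncovered:
--         return True
--     cands = {uncovered[0][0], uncovered[0][1]}
--     for a, b in uncovered:
--         cands &= {a, b}
--     return bool(cands)
-- ===== Notes on version B (the rewrite author's own statement) =====
-- stated objective: alternative
-- what changed: Instead of picking the two endpoints of the first uncovered pair and rescanning the uncovered list once per candidate via check_y, B keeps a shrinking candidate set and intersects it with each uncovered pair in a single pass, returning whether it is nonempty.
import Mathlib
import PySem

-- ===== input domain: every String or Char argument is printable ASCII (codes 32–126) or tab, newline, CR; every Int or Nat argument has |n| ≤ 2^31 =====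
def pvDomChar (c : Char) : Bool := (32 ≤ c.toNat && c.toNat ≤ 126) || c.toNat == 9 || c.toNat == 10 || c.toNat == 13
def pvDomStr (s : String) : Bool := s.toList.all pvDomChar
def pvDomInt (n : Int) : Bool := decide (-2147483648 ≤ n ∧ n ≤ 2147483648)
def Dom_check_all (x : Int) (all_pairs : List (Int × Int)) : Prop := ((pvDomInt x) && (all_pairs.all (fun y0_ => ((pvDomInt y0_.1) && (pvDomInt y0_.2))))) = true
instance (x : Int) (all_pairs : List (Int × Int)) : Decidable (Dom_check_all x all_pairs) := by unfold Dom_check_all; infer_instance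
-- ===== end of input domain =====

-- B replaces the pick-two-candidates-and-rescan (check_y twice) scheme by a single pass
-- that intersects a shrinking candidate set with every uncovered pair (objective: alternative).


-- ===== PORT A =====
-- for a, b in uncovered_pairs: if a != y and b != y: return False / return True
def check_y (y : Int) : List (Int × Int) → Bool
  | [] => true
  | (a, b) :: rest => if a != y && b != y then false else check_y y rest

def check_all (x : Int) (all_pairs : List (Int × Int)) : Bool :=
  -- uncovered built by the append loop
  let uncovered := all_pairs.foldl
    (fun acc p => if p.1 != x && p.2 != x then acc ++ [p] else acc) []
  match uncovered with
  | [] => true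
  | (y1, y2) :: _ =>
    if check_y y1 uncovered then true
    else if check_y y2 uncovered then true
    else false

-- ===== PORT B =====
def check_all_alt (x : Int) (all_pairs : List (Int × Int)) : Bool :=
  let uncovered := all_pairs.filter (fun p => p.1 != x && p.2 != x)
  match uncovered with
  | [] => true
  | (a0, b0) :: _ =>
    -- cands = {a0, b0}; for a, b in uncovered: cands &= {a, b}; return bool(cands)
    let cands : PySem.Set Int := PySem.Set.ofList [a0, b0]
    let final := uncovered.foldl
      (fun c p => PySem.Set.inter c (PySem.Set.ofList [p.1, p.2])) cands
    !final.isEmpty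

-- ===== PRECONDITION & SPEC =====
def Spec_check_all (x : Int) (all_pairs : List (Int × Int)) (out : Bool) : Prop := out = check_all_alt x all_pairs
instance (x : Int) (all_pairs : List (Int × Int)) (out : Bool) : Decidable (Spec_check_all x all_pairs out) := by unfold Spec_check_all; infer_instance

-- ===== CLAIM (what is proved, stated in full; the proofs are below) =====
def Claim_equal_check_all : Prop := ∀ (x : Int) (all_pairs : List (Int × Int)), Dom_check_all x all_pairs → Spec_check_all x all_pairs (check_all x all_pairs)

-- ===== LEMMAS AND PROOFS =====

-- A's append loop builds the filter of the pair list.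
lemma uncovered_eq (x : Int) (l : List (Int × Int)) (acc : List (Int × Int)) :
    l.foldl (fun acc p => if p.1 != x && p.2 != x then acc ++ [p] else acc) acc
      = acc ++ l.filter (fun p => p.1 != x && p.2 != x) := by
  induction l generalizing acc with
  | nil => simp
  | cons h t ih =>
    simp only [List.foldl_cons, List.filter_cons]
    by_cases hc : (h.1 != x && h.2 != x) = true
    · rw [if_pos hc, if_pos hc, ih]; simp
    · rw [if_neg hc, if_neg hc, ih]

-- check_y is an 'all' over the pairs.
lemma check_y_eq_all (y : Int) (l : List (Int × Int)) :
    check_y y l = l.all (fun p => y ∈ ([p.1, p.2] : List Int)) := by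
  induction l with
  | nil => rfl
  | cons h t ih =>
    obtain ⟨a, b⟩ := h
    by_cases ha : a = y
    · subst ha; simp [check_y, ih]
    · by_cases hb : b = y
      · subst hb; simp [check_y, ih]
      · simp [check_y, ha, hb, Ne.symm ha, Ne.symm hb]

-- Folding set-intersection with every pair filters the start set by membership in every pair.
lemma fold_inter_eq (l : List (Int × Int)) (c : List Int) :
    l.foldl (fun c p => PySem.Set.inter c (PySem.Set.ofList [p.1, p.2])) c
      = c.filter (fun y => l.all (fun p => y ∈ ([p.1, p.2] : List Int))) := by
  induction l generalizing c with
  | nil => simp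
  | cons h t ih =>
    simp only [List.foldl_cons, ih]
    have hstep : PySem.Set.inter c (PySem.Set.ofList [h.1, h.2])
        = c.filter (fun y => y ∈ ([h.1, h.2] : List Int)) := by
      simp [PySem.Set.inter, PySem.Set.ofList]
    rw [hstep, List.filter_filter]
    simp only [List.all_cons]
    exact List.filter_congr (fun y _ => by rw [Bool.and_comm])

-- a nonempty filtered set ↔ some element of the original list satisfies the predicate
lemma any_filter_ofList (l : List Int) (P : Int → Bool) :
    (!((PySem.Set.ofList l).filter P).isEmpty) = l.any P := by
  by_cases h : ∃ y ∈ l, P y = true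
  · obtain ⟨y, hy, hP⟩ := h
    have h1 : l.any P = true := List.any_eq_true.mpr ⟨y, hy, hP⟩
    have h2 : ((PySem.Set.ofList l).filter P).isEmpty = false := by
      rw [List.isEmpty_eq_false_iff]
      intro hnil
      have hm := List.mem_filter.mpr ⟨(PySem.Set.mem_ofList l y).mpr hy, hP⟩
      rw [hnil] at hm
      exact absurd hm (List.not_mem_nil)
    rw [h1, h2]; rfl
  · have h1 : l.any P = false := by
      rw [Bool.eq_false_iff]
      intro hc
      exact h (List.any_eq_true.mp hc)
    have h2 : ((PySem.Set.ofList l).filter P).isEmpty = true := by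
      rw [List.isEmpty_iff, List.filter_eq_nil_iff]
      intro y hy hP
      exact h ⟨y, (PySem.Set.mem_ofList l y).mp hy, hP⟩
    rw [h1, h2]; rfl

-- ===== VERDICT (by name: the statement is the Claim_ definition above) =====
theorem check_all_spec : Claim_equal_check_all := by
  intro x all_pairs _
  unfold Spec_check_all check_all check_all_alt
  simp only [uncovered_eq, List.nil_append]
  generalize List.filter (fun p => p.1 != x && p.2 != x) all_pairs = u
  cases u with
  | nil => rfl
  | cons hd tl =>
    obtain ⟨a0, b0⟩ := hd
    simp only [fold_inter_eq, any_filter_ofList, check_y_eq_all,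
      List.any_cons, List.any_nil, Bool.or_false]
    split_ifs with h1 h2 <;> simp_all
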